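-- pv_equiv track=rewrite | github.com/cntanos/greektax | scripts/validate_translations.py | _mark_section_usage
-- ===== SOURCE A (Python) =====
-- from typing import Iterable
--
-- def _mark_section_usage(keys: Iterable[str], sections: set[str]) -> set[str]:
--     used: set[str] = set()
--     for key in keys:
--         for section in sections:
--             if key == section or key.startswith(f"{section}."):
--                 used.add(key)
--                 break
--     return used
-- ===== SOURCE B (Python) =====
-- def _mark_section_usage(keys, sections):
--     # One pass per key: test the key itself and each dot-prefix against the
--     # sections set, instead of scanning all sections per key.
--     used = set()
--     for key in keys:
--         if key in sections or any(
--             ch == "." and key[:i] in sections for i, ch in enumerate(key)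
--         ):
--             used.add(key)
--     return used
-- ===== Notes on version B (the rewrite author's own statement) =====
-- stated objective: faster
-- what changed: Instead of scanning the whole sections collection for every key (string-comparing each), B tests only the key itself and its dot-prefixes key[:i] (one per '.' in the key) for set membership, removing the inner loop over sections.
import Mathlib
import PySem

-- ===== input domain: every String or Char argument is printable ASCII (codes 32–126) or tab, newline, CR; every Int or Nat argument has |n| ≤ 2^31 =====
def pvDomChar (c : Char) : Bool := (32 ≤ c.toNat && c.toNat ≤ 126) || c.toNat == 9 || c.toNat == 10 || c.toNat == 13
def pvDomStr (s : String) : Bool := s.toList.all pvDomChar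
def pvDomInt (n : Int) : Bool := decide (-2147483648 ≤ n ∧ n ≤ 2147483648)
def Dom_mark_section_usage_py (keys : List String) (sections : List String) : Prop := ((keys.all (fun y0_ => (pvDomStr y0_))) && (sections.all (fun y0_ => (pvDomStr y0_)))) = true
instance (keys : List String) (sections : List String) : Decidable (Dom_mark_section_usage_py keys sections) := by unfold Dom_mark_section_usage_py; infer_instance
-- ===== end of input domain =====

-- B replaces A's scan over all sections per key by membership tests of the key
-- and its dot-prefixes against the sections set (objective: faster).


-- ===== PORT A =====
-- inner 'for section in sections: … break' loop (order-independent: it only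
-- decides whether some section matches the key)
def pvInnerA (key : String) : List String → Bool
  | [] => false
  | s :: rest =>
      if key == s || PySem.Str.startswith key (s ++ ".") then true
      else pvInnerA key rest

def mark_section_usage_py (keys : List String) (sections : List String) : List String :=
  keys.foldl
    (fun used key => if pvInnerA key sections then PySem.Set.add used key else used)
    PySem.Set.empty

-- ===== PORT B =====
-- 'key in sections or any(ch == "." and key[:i] in sections for i, ch in enumerate(key))'
def pvMatchB (key : String) (sections : List String) : Bool :=
  sections.contains key ||
    (PySem.List.enumerate key.toList 0).any
      (fun p => p.2 == '.' && sections.contains (PySem.Str.slice key none (some p.1)))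

def mark_section_usage_py_alt (keys : List String) (sections : List String) : List String :=
  keys.foldl
    (fun used key => if pvMatchB key sections then PySem.Set.add used key else used)
    PySem.Set.empty

-- ===== PRECONDITION & SPEC =====
def Spec_mark_section_usage_py (keys : List String) (sections : List String) (out : List String) : Prop := out = mark_section_usage_py_alt keys sections
instance (keys : List String) (sections : List String) (out : List String) : Decidable (Spec_mark_section_usage_py keys sections out) := by unfold Spec_mark_section_usage_py; infer_instance

-- ===== CLAIM (what is proved, stated in full; the proofs are below) =====
def Claim_equal_mark_section_usage_py : Prop := ∀ (keys : List String) (sections : List String), Dom_mark_section_usage_py keys sections → Spec_mark_section_usage_py keys sections (mark_section_usage_py keys sections)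

-- ===== LEMMAS AND PROOFS =====

lemma pv_toList_inj (a b : String) (h : a.toList = b.toList) : a = b := by
  exact String.toList_inj.mp h

lemma pvInnerA_eq_any (key : String) (sections : List String) :
    pvInnerA key sections
      = sections.any (fun s => key == s || PySem.Str.startswith key (s ++ ".")) := by
  induction sections with
  | nil => rfl
  | cons s rest ih =>
      simp only [pvInnerA, List.any_cons, ← ih]
      cases h : (key == s || PySem.Str.startswith key (s ++ ".")) <;> simp_all

lemma pv_mem_enumerate (xs : List Char) : ∀ (st i : Int) (c : Char),
    (i, c) ∈ PySem.List.enumerate xs st ↔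
      ∃ n : Nat, i = st + n ∧ xs[n]? = some c := by
  induction xs with
  | nil => intro st i c; simp [PySem.List.enumerate_nil]
  | cons x xs ih =>
      intro st i c
      rw [PySem.List.enumerate_cons]
      simp only [List.mem_cons, ih, Prod.mk.injEq]
      constructor
      · rintro (⟨rfl, rfl⟩ | ⟨n, h1, h2⟩)
        · exact ⟨0, by simp, by simp⟩
        · exact ⟨n + 1, by push_cast at h1 ⊢; omega, by simpa using h2⟩
      · rintro ⟨n, h1, h2⟩
        cases n with
        | zero =>
            left
            simp only [List.getElem?_cons_zero, Option.some.injEq] at h2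
            constructor
            · omega
            · exact h2.symm
        | succ m =>
            right
            exact ⟨m, by push_cast at h1 ⊢; omega, by simpa using h2⟩

lemma pv_startswith_dot_iff (key s : String) :
    PySem.Str.startswith key (s ++ ".") = true ↔ s.toList ++ ['.'] <+: key.toList := by
  simp [PySem.Chars.startswith_iff]

lemma pv_slice_toList (key : String) (n : Nat) :
    (PySem.Str.slice key none (some (n : Int))).toList = key.toList.take n := by
  simp [PySem.Str.toList_slice, PySem.List.slice_to_natCast]

lemma pv_match_eq (key : String) (sections : List String) :
    pvInnerA key sections = pvMatchB key sections := by
  rw [pvInnerA_eq_any, pvMatchB, Bool.eq_iff_iff]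
  simp only [List.any_eq_true, Bool.or_eq_true, Bool.and_eq_true, beq_iff_eq,
    List.contains_iff_mem]
  constructor
  · rintro ⟨s, hs, hcase⟩
    rcases hcase with rfl | hpre
    · exact Or.inl hs
    · right
      rw [pv_startswith_dot_iff] at hpre
      obtain ⟨t, ht⟩ := hpre
      have hkey : key.toList = s.toList ++ '.' :: t := by
        rw [← ht]; simp
      refine ⟨((s.toList.length : Int), '.'), ?_, rfl, ?_⟩
      · rw [pv_mem_enumerate]
        refine ⟨s.toList.length, by simp, ?_⟩
        rw [hkey, List.getElem?_append_right (le_refl _)]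
        simp
      · have htake : key.toList.take s.toList.length = s.toList := by
          rw [hkey]
          simp
        have : PySem.Str.slice key none (some (s.toList.length : Int)) = s :=
          pv_toList_inj _ _ (by rw [pv_slice_toList, htake])
        rwa [this]
  · rintro (hk | ⟨⟨i, c⟩, hmem, hc, hslice⟩)
    · exact ⟨key, hk, Or.inl rfl⟩
    · rw [pv_mem_enumerate] at hmem
      obtain ⟨n, hi, hget⟩ := hmem
      obtain ⟨hn, hgetE⟩ := List.getElem?_eq_some_iff.mp hget
      have hi' : i = (n : Int) := by omega
      subst hi'
      subst hc
      refine ⟨PySem.Str.slice key none (some (n : Int)), hslice, Or.inr ?_⟩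
      rw [pv_startswith_dot_iff, pv_slice_toList]
      refine ⟨key.toList.drop (n + 1), ?_⟩
      rw [List.append_assoc]
      have hdrop : key.toList.drop n = '.' :: key.toList.drop (n + 1) := by
        rw [List.drop_eq_getElem_cons hn, hgetE]
      rw [List.singleton_append, ← hdrop, List.take_append_drop]

lemma pv_fold_eq (sections : List String) (keys acc : List String) :
    keys.foldl (fun used key => if pvInnerA key sections then PySem.Set.add used key else used) acc
  = keys.foldl (fun used key => if pvMatchB key sections then PySem.Set.add used key else used) acc := by
  simp only [pv_match_eq]

-- ===== VERDICT (by name: the statement is the Claim_ definition above) =====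
theorem mark_section_usage_py_spec : Claim_equal_mark_section_usage_py := by
  intro keys sections _
  show mark_section_usage_py keys sections = mark_section_usage_py_alt keys sections
  unfold mark_section_usage_py mark_section_usage_py_alt
  exact pv_fold_eq sections keys _
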